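-- pv_equiv track=rewrite | github.com/lth-elm/connect-4-a.i | IA_TDF_C_la_puissance.py | Actions
-- ===== SOURCE A (Python) =====
-- def Actions(s):
--     """Retourner les positions libres."""
--     action = []
--     dimJ = len(s[0])
--     for j in range(dimJ):
--         if PlaceLibre(s, j):
--             i = DernierJeton(s, j)
--             action.append([i, j])
--     return action
--
-- def PlaceLibre(s, j):
--     """Observe si la colonne est jouable à partir de la première ligne."""
--     if s[0][j] == " ":
--         return True
--     return False
--
-- def DernierJeton(s, j):
--     """Renvoie la position jouable pour un jeton à une colonne donnée."""
--     for i in range(len(s)):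
--         if s[i][j] != " ":
--             return i-1  # ligne où l'on doit insérer le jeton selon la colonne entrée (-1 permet de le mettre au dessus)
--     return len(s)-1
-- ===== SOURCE B (Python) =====
-- def Actions(s):
--     """Retourner les positions libres."""
--     cols = len(s[0])
--     land = [None] * cols
--     for i, row in enumerate(s):
--         land = [i - 1 if v is None and row[j] != " " else v
--                 for j, v in enumerate(land)]
--     return [[len(s) - 1 if land[j] is None else land[j], j]
--             for j in range(cols) if s[0][j] == " "]
-- ===== Notes on version B (the rewrite author's own statement) =====
-- stated objective: alternative
-- what changed: Replaced A's per-column top-down scans (PlaceLibre + DernierJeton per column) by a single row-major sweep that maintains a per-column landing table, then emits the playable columns in one final pass.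
import Mathlib
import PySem

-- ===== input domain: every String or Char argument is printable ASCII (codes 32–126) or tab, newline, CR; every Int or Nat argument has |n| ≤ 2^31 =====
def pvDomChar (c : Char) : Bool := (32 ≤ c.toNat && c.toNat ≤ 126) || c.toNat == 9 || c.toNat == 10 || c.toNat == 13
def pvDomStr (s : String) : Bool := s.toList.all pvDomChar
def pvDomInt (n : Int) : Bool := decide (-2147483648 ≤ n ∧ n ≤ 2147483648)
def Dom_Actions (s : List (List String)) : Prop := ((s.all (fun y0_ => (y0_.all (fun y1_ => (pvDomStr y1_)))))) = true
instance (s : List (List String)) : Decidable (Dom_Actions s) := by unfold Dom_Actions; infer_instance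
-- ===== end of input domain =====

-- B replaces A's per-column top-down scans by a single row-major sweep maintaining a
-- per-column landing table (objective: alternative decomposition, same asymptotic cost).

-- ===== PORT A =====
def PlaceLibre (s : List (List String)) (j : Int) : Bool :=
  if PySem.List.pyGetD (PySem.List.pyGetD s 0 []) j "" == " " then true else false

def DJloop (s : List (List String)) (j : Int) : List Int → Int
  | [] => (s.length : Int) - 1
  | i :: rest =>
    if PySem.List.pyGetD (PySem.List.pyGetD s i []) j "" ≠ " " then i - 1
    else DJloop s j rest

def DernierJeton (s : List (List String)) (j : Int) : Int :=
  DJloop s j (PySem.List.pyRange 0 (s.length : Int))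

def Actions (s : List (List String)) : List (List Int) :=
  (PySem.List.pyRange 0 ((PySem.List.pyGetD s 0 []).length : Int)).foldl
    (fun action j =>
      if PlaceLibre s j then action ++ [[DernierJeton s j, j]] else action) []

-- ===== PORT B =====
-- one row of B's sweep: settle every still-undecided column against this row
def bStep (i : Int) (row : List String) (land : List (Option Int)) : List (Option Int) :=
  (PySem.List.enumerate land).map (fun jv =>
    match jv.2 with
    | some v => some v
    | none => if PySem.List.pyGetD row jv.1 "" ≠ " " then some (i - 1) else none)

def Actions_alt (s : List (List String)) : List (List Int) :=
  let cols := (PySem.List.pyGetD s 0 []).length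
  let land := (PySem.List.enumerate s).foldl (fun land ri => bStep ri.1 ri.2 land)
                (List.replicate cols (none : Option Int))
  (PySem.List.pyRange 0 (cols : Int)).foldl
    (fun res j =>
      if PySem.List.pyGetD (PySem.List.pyGetD s 0 []) j "" == " "
      then res ++ [[(PySem.List.pyGetD land j none).getD ((s.length : Int) - 1), j]]
      else res) []

-- ===== PRECONDITION & SPEC =====
-- Exactly the boards on which the Python A returns (no IndexError): s is nonempty and no
-- playable column's top-down scan runs off the end of a short row.
def Pre_Actions (s : List (List String)) : Prop :=
  s ≠ [] ∧ ∀ jn < (s.headD []).length, (s.headD []).getD jn "" = " " →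
    ∀ i < s.length, (∀ k < i, (s.getD k []).getD jn "" = " ") → jn < (s.getD i []).length
instance (s : List (List String)) : Decidable (Pre_Actions s) := by unfold Pre_Actions; infer_instance
def pvWitness_Actions : List (List String) := [[" ", "X"], ["O", "X"]]

def Spec_Actions (s : List (List String)) (out : List (List Int)) : Prop := out = Actions_alt s
instance (s : List (List String)) (out : List (List Int)) : Decidable (Spec_Actions s out) := by unfold Spec_Actions; infer_instance

-- ===== CLAIM (what is proved, stated in full; the proofs are below) =====
def Claim_equal_Actions : Prop := ∀ (s : List (List String)), Dom_Actions s → Pre_Actions s → Spec_Actions s (Actions s)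

-- ===== LEMMAS AND PROOFS =====

-- the row index (minus one) at which column j settles, scanning rows from index k
def hit (j : Nat) : Nat → List (List String) → Option Int
  | _, [] => none
  | k, row :: rest => if row.getD j "" ≠ " " then some ((k : Int) - 1) else hit j (k+1) rest

lemma DJloop_eq_hit (s : List (List String)) (jn : Nat) :
    ∀ (n k : Nat), k + n = s.length →
      DJloop s (jn : Int) ((List.range' k n).map (fun i : Nat => (i : Int)))
        = (hit jn k (s.drop k)).getD ((s.length : Int) - 1) := by
  intro n
  induction n with
  | zero =>
    intro k hk
    have : s.drop k = [] := List.drop_eq_nil_of_le (by omega)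
    simp [this, DJloop, hit]
  | succ n ih =>
    intro k hk
    have hk' : k < s.length := by omega
    have hdrop : s.drop k = s[k] :: s.drop (k+1) := (List.getElem_cons_drop hk').symm
    rw [List.range'_succ]
    simp only [List.map_cons, DJloop]
    rw [PySem.List.pyGetD_natCast s k, PySem.List.pyGetD_natCast _ jn]
    have hget : s.getD k [] = s[k] := List.getD_eq_getElem s [] hk'
    rw [hdrop, hit, hget]
    split
    · rfl
    · exact ih (k+1) (by omega)

lemma DernierJeton_eq_hit (s : List (List String)) (jn : Nat) :
    DernierJeton s (jn : Int) = (hit jn 0 s).getD ((s.length : Int) - 1) := by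
  rw [DernierJeton, PySem.List.pyRange_zero_natCast, List.range_eq_range']
  simpa using DJloop_eq_hit s jn s.length 0 (by omega)

lemma bStep_length (i : Int) (row : List String) (L : List (Option Int)) :
    (bStep i row L).length = L.length := by
  simp [bStep, PySem.List.length_enumerate]

lemma getElem_enumerate {α : Type} (L : List α) (k : Int) (n : Nat) (h : n < L.length) :
    (PySem.List.enumerate L k)[n]'(by rw [PySem.List.length_enumerate]; exact h)
      = (k + n, L[n]) := by
  induction L generalizing k n with
  | nil => simp at h
  | cons x t ih =>
    cases n with
    | zero => simp [PySem.List.enumerate]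
    | succ m =>
      have hm : m < t.length := by simpa using h
      have := ih (k + 1) m hm
      simp only [PySem.List.enumerate, List.getElem_cons_succ]
      rw [this, Prod.mk.injEq]
      exact ⟨by push_cast; ring, rfl⟩

lemma bStep_getD (i : Int) (row : List String) (L : List (Option Int)) (jn : Nat)
    (h : jn < L.length) :
    (bStep i row L).getD jn none
      = match L.getD jn none with
        | some v => some v
        | none => if row.getD jn "" ≠ " " then some (i - 1) else none := by
  have h' : jn < (bStep i row L).length := by rw [bStep_length]; exact h
  rw [List.getD_eq_getElem _ _ h', List.getD_eq_getElem _ _ h]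
  simp only [bStep, List.getElem_map]
  rw [getElem_enumerate L 0 jn h]
  simp [PySem.List.pyGetD_natCast]

lemma bfold_getD (jn : Nat) :
    ∀ (rows : List (List String)) (k : Nat) (L : List (Option Int)), jn < L.length →
      ((PySem.List.enumerate rows (k : Int)).foldl (fun land ri => bStep ri.1 ri.2 land) L).getD jn none
        = match L.getD jn none with
          | some v => some v
          | none => hit jn k rows := by
  intro rows
  induction rows with
  | nil =>
    intro k L _
    simp only [PySem.List.enumerate, List.foldl_nil, hit]
    cases L.getD jn none <;> rfl
  | cons row rest ih =>
    intro k L hL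
    have hcons : PySem.List.enumerate (row :: rest) (k : Int)
        = ((k : Int), row) :: PySem.List.enumerate rest ((k+1 : Nat) : Int) := by
      rw [show ((k+1 : Nat) : Int) = (k : Int) + 1 by push_cast; ring]
      rfl
    rw [hcons, List.foldl_cons]
    rw [ih (k+1) _ (by rw [bStep_length]; exact hL)]
    rw [bStep_getD _ _ _ _ hL]
    cases hc : L.getD jn none with
    | some v => rfl
    | none =>
      simp only [hit]
      split <;> simp_all

lemma Actions_eq_alt (s : List (List String)) : Actions s = Actions_alt s := by
  unfold Actions Actions_alt
  simp only []
  rw [show (fun (action : List (List Int)) (j : Int) =>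
        if PlaceLibre s j then action ++ [[DernierJeton s j, j]] else action)
      = (fun action j =>
        if (PySem.List.pyGetD (PySem.List.pyGetD s 0 []) j "" == " ") = true
        then action ++ [[DernierJeton s j, j]] else action) from by
    funext action j
    by_cases h : (PySem.List.pyGetD (PySem.List.pyGetD s 0 []) j "" == " ") = true <;>
      simp [PlaceLibre, h]]
  rw [PySem.List.foldl_append_if, PySem.List.foldl_append_if]
  simp only [List.nil_append]
  apply List.map_congr_left
  intro j hj
  have hj' := (PySem.List.mem_pyRange_one.mp (List.mem_filter.mp hj).1)
  obtain ⟨jn, rfl⟩ : ∃ jn : Nat, j = (jn : Int) :=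
    ⟨j.toNat, (Int.toNat_of_nonneg hj'.1).symm⟩
  have hjn : jn < (PySem.List.pyGetD s 0 []).length := by exact_mod_cast hj'.2
  have hland : PySem.List.pyGetD
      ((PySem.List.enumerate s).foldl (fun land ri => bStep ri.1 ri.2 land)
        (List.replicate (PySem.List.pyGetD s 0 []).length (none : Option Int))) (jn : Int) none
      = hit jn 0 s := by
    rw [PySem.List.pyGetD_natCast]
    have h0 := bfold_getD jn s 0 _ (by simpa using hjn :
      jn < (List.replicate (PySem.List.pyGetD s 0 []).length (none : Option Int)).length)
    rw [Nat.cast_zero] at h0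
    rw [h0]
    simp
  rw [hland, DernierJeton_eq_hit]

-- ===== VERDICT (by name: the statement is the Claim_ definition above) =====
theorem Actions_spec : Claim_equal_Actions := by
  intro s _ _
  unfold Spec_Actions
  exact Actions_eq_alt s
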